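-- pv_equiv track=rewrite | github.com/lixiaoruiusa/Rui7272 | Company/面经整理OA/M家/6HE/下载/oa5.py | get_left_right_sum
-- ===== SOURCE A (Python) =====
-- def get_left_right_sum(a: list[int]) -> list[(int, int)]:
--     left_sum = 0
--     right_sum = sum(a)
--     result = []
--     for elem in a:
--         left_sum += elem
--         right_sum -= elem
--         result.append((left_sum, right_sum))
--     return result
-- ===== SOURCE B (Python) =====
-- def get_left_right_sum(a: list[int]) -> list[(int, int)]:
--     total = sum(a)
--     out = []
--     suffix = 0
--     for x in reversed(a):
--         out.append((total - suffix, suffix))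
--         suffix += x
--     out.reverse()
--     return out
-- ===== Notes on version B (the rewrite author's own statement) =====
-- stated objective: alternative
-- what changed: B traverses the list in reverse with a single suffix-sum accumulator, emits each pair as (total - suffix, suffix), builds the output back-to-front and reverses it once, instead of A's forward pass with two running accumulators (incrementing left, decrementing right).
import Mathlib
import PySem

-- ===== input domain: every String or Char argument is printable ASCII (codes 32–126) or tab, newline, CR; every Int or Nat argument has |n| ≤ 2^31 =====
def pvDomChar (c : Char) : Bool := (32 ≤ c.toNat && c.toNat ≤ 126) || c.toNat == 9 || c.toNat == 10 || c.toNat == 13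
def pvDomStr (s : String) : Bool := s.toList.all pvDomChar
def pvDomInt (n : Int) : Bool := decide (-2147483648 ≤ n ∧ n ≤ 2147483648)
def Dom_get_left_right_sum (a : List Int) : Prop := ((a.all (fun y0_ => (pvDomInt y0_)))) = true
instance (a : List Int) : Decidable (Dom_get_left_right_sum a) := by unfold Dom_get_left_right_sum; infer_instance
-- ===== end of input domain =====

-- B traverses the list in reverse with one suffix-sum accumulator, building the output
-- back-to-front and reversing it once, instead of A's forward pass with two running
-- accumulators (alternative decomposition; same O(n) cost).

-- ===== PORT A =====
-- A: running left_sum (incremented) and right_sum (decremented), appending pairs.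
def get_left_right_sum (a : List Int) : List (Int × Int) :=
  (a.foldl
    (fun s elem =>
      let left := s.1 + elem
      let right := s.2.1 - elem
      (left, right, s.2.2 ++ [(left, right)]))
    ((0 : Int), a.sum, ([] : List (Int × Int)))).2.2

-- ===== PORT B =====
-- B: reverse traversal, suffix accumulator, append pairs, reverse the output at the end.
def get_left_right_sum_alt (a : List Int) : List (Int × Int) :=
  let total := a.sum
  let p := a.reverse.foldl
    (fun (s : Int × List (Int × Int)) x => (s.1 + x, s.2 ++ [(total - s.1, s.1)]))
    ((0 : Int), ([] : List (Int × Int)))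
  p.2.reverse

-- ===== PRECONDITION & SPEC =====
def Spec_get_left_right_sum (a : List Int) (out : List (Int × Int)) : Prop := out = get_left_right_sum_alt a
instance (a : List Int) (out : List (Int × Int)) : Decidable (Spec_get_left_right_sum a out) := by unfold Spec_get_left_right_sum; infer_instance

-- ===== CLAIM (what is proved, stated in full; the proofs are below) =====
def Claim_equal_get_left_right_sum : Prop := ∀ (a : List Int), Dom_get_left_right_sum a → Spec_get_left_right_sum a (get_left_right_sum a)

-- ===== LEMMAS AND PROOFS =====

-- prefix sums starting from acc (characterises A's left_sum values)
def pvAccum (acc : Int) : List Int → List Int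
  | [] => []
  | x :: xs => (acc + x) :: pvAccum (acc + x) xs

-- pairs emitted by B's reversed loop, started at suffix s0
def pvB (total s0 : Int) : List Int → List (Int × Int)
  | [] => []
  | x :: xs => (total - s0, s0) :: pvB total (s0 + x) xs

theorem pv_loopA_eq (a : List Int) : ∀ (l r : Int) (res : List (Int × Int)),
    (a.foldl
      (fun s elem =>
        let left := s.1 + elem
        let right := s.2.1 - elem
        (left, right, s.2.2 ++ [(left, right)]))
      (l, r, res)).2.2
    = res ++ (pvAccum l a).map (fun p => (p, l + r - p)) := by
  induction a with
  | nil => intro l r res; simp [pvAccum]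
  | cons x xs ih =>
    intro l r res
    simp only [List.foldl_cons, pvAccum, List.map_cons]
    rw [ih]
    have h1 : l + r - (l + x) = r - x := by ring
    have h2 : (fun p => (p, l + x + (r - x) - p)) = (fun p : Int => (p, l + r - p)) := by
      funext p; simp
    rw [h2, h1]
    simp

theorem pv_loopB_eq (total : Int) (l : List Int) : ∀ (s0 : Int) (res : List (Int × Int)),
    (l.foldl (fun (s : Int × List (Int × Int)) x => (s.1 + x, s.2 ++ [(total - s.1, s.1)]))
      (s0, res)).2
    = res ++ pvB total s0 l := by
  induction l with
  | nil => intro s0 res; simp [pvB]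
  | cons x xs ih => intro s0 res; simp only [List.foldl_cons, pvB]; rw [ih]; simp

theorem pvAccum_append_singleton (as : List Int) : ∀ (acc x : Int),
    pvAccum acc (as ++ [x]) = pvAccum acc as ++ [acc + as.sum + x] := by
  induction as with
  | nil => intro acc x; simp [pvAccum]
  | cons y ys ih =>
    intro acc x
    simp only [List.cons_append, pvAccum, ih, List.sum_cons]
    have h : acc + (y + ys.sum) = acc + y + ys.sum := by ring
    rw [h]

theorem pv_bridge (a : List Int) : ∀ (t s0 : Int),
    (pvB t s0 a.reverse).reverse
    = (pvAccum (t - s0 - a.sum) a).map (fun p => (p, t - p)) := by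
  induction a using List.reverseRecOn with
  | nil => intro t s0; simp [pvB, pvAccum]
  | append_singleton as x ih =>
    intro t s0
    rw [List.reverse_append]
    simp only [List.reverse_cons, List.reverse_nil, List.nil_append, List.singleton_append, pvB,
      List.reverse_cons]
    rw [ih t (s0 + x)]
    rw [pvAccum_append_singleton, List.map_append]
    have h1 : t - (s0 + x) - as.sum = t - s0 - (as ++ [x]).sum := by
      simp [List.sum_append]; ring
    rw [h1]
    simp [List.sum_append]
    constructor <;> ring

-- ===== VERDICT (by name: the statement is the Claim_ definition above) =====
theorem get_left_right_sum_spec : Claim_equal_get_left_right_sum := by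
  intro a _
  unfold Spec_get_left_right_sum
  have hA : get_left_right_sum a = (pvAccum 0 a).map (fun p => (p, 0 + a.sum - p)) := by
    unfold get_left_right_sum; rw [pv_loopA_eq]; simp
  have hB : get_left_right_sum_alt a = (pvB a.sum 0 a.reverse).reverse := by
    show ((a.reverse.foldl
        (fun (s : Int × List (Int × Int)) x => (s.1 + x, s.2 ++ [(a.sum - s.1, s.1)]))
        ((0 : Int), ([] : List (Int × Int)))).2).reverse = _
    rw [pv_loopB_eq, List.nil_append]
  rw [hA, hB, pv_bridge]
  simp
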